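-- pv_equiv track=rewrite | github.com/rocky-d/informatics | code/py/src/leetcode/done/p3030.py | resultGrid
-- ===== SOURCE A (Python) =====
-- from typing import List
--
-- def resultGrid(image: List[List[int]], threshold: int) -> List[List[int]]:
--     m, n = len(image), len(image[0])
--     excludes = set()
--     for row in range(m):
--         for col in range(1, n):
--             if threshold < abs(image[row][col - 1] - image[row][col]):
--                 for x, y in ((-2, -2), (-2, -1), (-1, -2), (-1, -1), (0, -2), (0, -1)):
--                     excludes.add((row + x, col + y))
--     for col in range(n):
--         for row in range(1, m):
--             if threshold < abs(image[row - 1][col] - image[row][col]):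
--                 for x, y in ((-2, -2), (-2, -1), (-2, 0), (-1, -2), (-1, -1), (-1, 0)):
--                     excludes.add((row + x, col + y))
--     pres = [[0 for _ in range(1 + n)]]
--     for row in range(m):
--         pres.append([0])
--         for col in range(n):
--             pres[-1].append(image[row][col] + pres[row + 1][col] + pres[row][col + 1] - pres[row][col])
--     totals = [[[0, 0] for _ in range(n)] for _ in range(m)]
--     for row in range(m - 2):
--         for col in range(n - 2):
--             if (row, col) in excludes:
--                 continue
--             average = (pres[row + 3][col + 3] - pres[row + 3][col] - pres[row][col + 3] + pres[row][col]) // 9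
--             for x, y in ((0, 0), (0, 1), (0, 2), (1, 0), (1, 1), (1, 2), (2, 0), (2, 1), (2, 2)):
--                 totals[row + x][col + y][0] += average
--                 totals[row + x][col + y][1] += 1
--     return [[image[row][col] if 0 == totals[row][col][1] else totals[row][col][0] // totals[row][col][1] for col in range(n)] for row in range(m)]
-- ===== SOURCE B (Python) =====
-- def resultGrid(image, threshold):
--     m, n = len(image), len(image[0])
--     acc = [[(0, 0) for _ in range(n)] for _ in range(m)]
--     for r in range(m - 2):
--         for c in range(n - 2):
--             smooth = all(abs(image[r + i][c + j] - image[r + i][c + j + 1]) <= threshold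
--                          for i in range(3) for j in range(2)) and \
--                      all(abs(image[r + i][c + j] - image[r + i + 1][c + j]) <= threshold
--                          for i in range(2) for j in range(3))
--             if not smooth:
--                 continue
--             avg = sum(image[r + i][c + j] for i in range(3) for j in range(3)) // 9
--             for i in range(3):
--                 for j in range(3):
--                     s, k = acc[r + i][c + j]
--                     acc[r + i][c + j] = (s + avg, k + 1)
--     return [[image[r][c] if acc[r][c][1] == 0 else acc[r][c][0] // acc[r][c][1]
--              for c in range(n)] for r in range(m)]
-- ===== Notes on version B (the rewrite author's own statement) =====
-- stated objective: simpler
-- what changed: Replaces A's global excludes-set (built from two adjacency sweeps with corner-offset marking) and the 2D prefix-sum table by a direct per-region pass: each 3x3 region checks its 12 internal adjacent pairs and sums its 9 cells in place, accumulating (sum,count) per covered cell.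
import Mathlib
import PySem

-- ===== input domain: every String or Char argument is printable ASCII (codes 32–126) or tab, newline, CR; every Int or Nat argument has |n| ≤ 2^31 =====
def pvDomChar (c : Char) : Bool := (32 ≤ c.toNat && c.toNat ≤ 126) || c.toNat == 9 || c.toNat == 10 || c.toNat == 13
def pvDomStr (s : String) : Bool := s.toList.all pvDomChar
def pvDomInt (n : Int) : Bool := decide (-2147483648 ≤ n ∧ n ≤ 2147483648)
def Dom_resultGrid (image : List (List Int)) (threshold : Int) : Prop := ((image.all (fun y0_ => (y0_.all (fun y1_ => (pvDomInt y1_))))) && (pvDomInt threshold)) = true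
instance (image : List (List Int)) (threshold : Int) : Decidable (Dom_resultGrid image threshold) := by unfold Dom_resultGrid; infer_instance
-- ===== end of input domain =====

-- B replaces A's excludes-set sweeps and prefix-sum table by a direct per-3x3-region
-- check (12 internal adjacent pairs) and direct 9-cell sum (objective: simpler).

-- ===== PORT A =====
-- image[r][c] on in-range indices (Pre_ guarantees every access both ports make is in range)
def pvPx (image : List (List Int)) (r c : Nat) : Int := (image.getD r []).getD c 0

def pvOffsH : List (Int × Int) := [(-2,-2),(-2,-1),(-1,-2),(-1,-1),(0,-2),(0,-1)]
def pvOffsV : List (Int × Int) := [(-2,-2),(-2,-1),(-2,0),(-1,-2),(-1,-1),(-1,0)]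

-- "for x, y in offsets: excludes.add((row + x, col + y))"
def pvAddOffs (s : PySem.Set (Int × Int)) (row col : Nat) (offs : List (Int × Int)) :
    PySem.Set (Int × Int) :=
  offs.foldl (fun s p => PySem.Set.add s ((row : Int) + p.1, (col : Int) + p.2)) s

def pvCells9 : List (Nat × Nat) := [(0,0),(0,1),(0,2),(1,0),(1,1),(1,2),(2,0),(2,1),(2,2)]

-- totals[r][c][0] += avg; totals[r][c][1] += 1  (pairs model the [sum, count] lists)
def pvUpd (t : List (List (Int × Int))) (r c : Nat) (avg : Int) : List (List (Int × Int)) :=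
  t.modify r (fun row => row.modify c (fun p => (p.1 + avg, p.2 + 1)))

def resultGrid (image : List (List Int)) (threshold : Int) : List (List Int) :=
  let m := image.length
  let n := (image.headD []).length
  let e1 := (List.range m).foldl (fun s row =>
      (List.range' 1 (n - 1)).foldl (fun s col =>
        if threshold < |pvPx image row (col - 1) - pvPx image row col| then
          pvAddOffs s row col pvOffsH
        else s) s) PySem.Set.empty
  let excludes := (List.range n).foldl (fun s col =>
      (List.range' 1 (m - 1)).foldl (fun s row =>
        if threshold < |pvPx image (row - 1) col - pvPx image row col| then
          pvAddOffs s row col pvOffsV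
        else s) s) e1
  let pres := (List.range m).foldl (fun pres row =>
      let prev := pres.getD row []
      let nr := (List.range n).foldl (fun nr col =>
          nr ++ [pvPx image row col + nr.getD col 0 + prev.getD (col + 1) 0 - prev.getD col 0])
        [0]
      pres ++ [nr]) [List.replicate (n + 1) 0]
  let totals := (List.range (m - 2)).foldl (fun t (row : Nat) =>
      (List.range (n - 2)).foldl (fun t (col : Nat) =>
        if ((row : Int), (col : Int)) ∈ excludes then t
        else
          let avg := PySem.Int.floordiv
            ((pres.getD (row + 3) []).getD (col + 3) 0 - (pres.getD (row + 3) []).getD col 0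
              - (pres.getD row []).getD (col + 3) 0 + (pres.getD row []).getD col 0) 9
          pvCells9.foldl (fun t xy => pvUpd t (row + xy.1) (col + xy.2) avg) t) t)
    (List.replicate m (List.replicate n ((0 : Int), (0 : Int))))
  (List.range m).map (fun row => (List.range n).map (fun col =>
    let p := (totals.getD row []).getD col (0, 0)
    if p.2 == 0 then pvPx image row col else PySem.Int.floordiv p.1 p.2))

-- ===== PORT B =====
def resultGrid_alt (image : List (List Int)) (threshold : Int) : List (List Int) :=
  let m := image.length
  let n := (image.headD []).length
  let acc := (List.range (m - 2)).foldl (fun t r =>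
      (List.range (n - 2)).foldl (fun t c =>
        let smooth :=
          ((List.range 3).all fun i => (List.range 2).all fun j =>
            decide (|pvPx image (r + i) (c + j) - pvPx image (r + i) (c + j + 1)| ≤ threshold)) &&
          ((List.range 2).all fun i => (List.range 3).all fun j =>
            decide (|pvPx image (r + i) (c + j) - pvPx image (r + i + 1) (c + j)| ≤ threshold))
        if smooth then
          let avg := PySem.Int.floordiv
            ((List.range 3).foldl (fun s i =>
              (List.range 3).foldl (fun s j => s + pvPx image (r + i) (c + j)) s) 0) 9
          (List.range 3).foldl (fun t i =>
            (List.range 3).foldl (fun t j => pvUpd t (r + i) (c + j) avg) t) t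
        else t) t)
    (List.replicate m (List.replicate n ((0 : Int), (0 : Int))))
  (List.range m).map (fun r => (List.range n).map (fun c =>
    let p := (acc.getD r []).getD c (0, 0)
    if p.2 == 0 then pvPx image r c else PySem.Int.floordiv p.1 p.2))

-- ===== PRECONDITION & SPEC =====
-- Pre_ = exactly the inputs where the Python A returns: a nonempty image (image[0] raises
-- IndexError on []) whose every row has at least len(image[0]) entries (shorter rows raise
-- IndexError inside the sweeps); longer rows are fine (their extra columns are ignored).
def Pre_resultGrid (image : List (List Int)) (threshold : Int) : Prop :=
  image ≠ [] ∧ ∀ row ∈ image, (image.headD []).length ≤ row.length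
instance (image : List (List Int)) (threshold : Int) : Decidable (Pre_resultGrid image threshold) := by
  unfold Pre_resultGrid; infer_instance

def pvWitness_resultGrid : List (List Int) × Int := ([[1, 2, 3], [4, 5, 6], [7, 8, 9]], 5)

def Spec_resultGrid (image : List (List Int)) (threshold : Int) (out : List (List Int)) : Prop := out = resultGrid_alt image threshold
instance (image : List (List Int)) (threshold : Int) (out : List (List Int)) : Decidable (Spec_resultGrid image threshold out) := by unfold Spec_resultGrid; infer_instance

-- ===== CLAIM (what is proved, stated in full; the proofs are below) =====
def Claim_equal_resultGrid : Prop := ∀ (image : List (List Int)) (threshold : Int), Dom_resultGrid image threshold → Pre_resultGrid image threshold → Spec_resultGrid image threshold (resultGrid image threshold)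

-- ===== LEMMAS AND PROOFS =====

-- the 2D prefix sum that A's pres table tabulates
def pvS (image : List (List Int)) (i j : Nat) : Int :=
  ∑ a ∈ Finset.range i, ∑ b ∈ Finset.range j, pvPx image a b

lemma pvSum_range_add3 (f : Nat → Int) (r : Nat) :
    ∑ a ∈ Finset.range (r + 3), f a = (∑ a ∈ Finset.range r, f a) + f r + f (r + 1) + f (r + 2) := by
  rw [show r + 3 = (r + 2) + 1 from rfl, Finset.sum_range_succ,
    show r + 2 = (r + 1) + 1 from rfl, Finset.sum_range_succ, Finset.sum_range_succ]

lemma pvS_rec (image : List (List Int)) (i j : Nat) :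
    pvS image (i + 1) (j + 1)
      = pvPx image i j + pvS image (i + 1) j + pvS image i (j + 1) - pvS image i j := by
  simp [pvS, Finset.sum_range_succ, Finset.sum_add_distrib]; ring

lemma pvS_col3 (image : List (List Int)) (i c : Nat) :
    pvS image i (c + 3) = pvS image i c
      + ∑ a ∈ Finset.range i, (pvPx image a c + pvPx image a (c + 1) + pvPx image a (c + 2)) := by
  simp only [pvS, pvSum_range_add3, Finset.sum_add_distrib]; ring

lemma pvS_window (image : List (List Int)) (r c : Nat) :
    pvS image (r + 3) (c + 3) - pvS image (r + 3) c - pvS image r (c + 3) + pvS image r c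
      = pvPx image r c + pvPx image r (c + 1) + pvPx image r (c + 2)
        + pvPx image (r + 1) c + pvPx image (r + 1) (c + 1) + pvPx image (r + 1) (c + 2)
        + pvPx image (r + 2) c + pvPx image (r + 2) (c + 1) + pvPx image (r + 2) (c + 2) := by
  rw [pvS_col3, pvS_col3,
    pvSum_range_add3 (fun a => pvPx image a c + pvPx image a (c + 1) + pvPx image a (c + 2)) r]
  ring

-- the inner row build of A's pres table
lemma pvRow_eq (image : List (List Int)) (n row : Nat) (prev : List Int)
    (hprev : prev = (List.range (n + 1)).map (fun j => pvS image row j)) (k : Nat) (hk : k ≤ n) :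
    (List.range k).foldl (fun nr col =>
        nr ++ [pvPx image row col + nr.getD col 0 + prev.getD (col + 1) 0 - prev.getD col 0]) [0]
      = (List.range (k + 1)).map (fun j => pvS image (row + 1) j) := by
  induction k with
  | zero => simp [pvS]
  | succ k ih =>
    rw [List.range_succ, List.foldl_append, ih (by omega)]
    rw [List.range_succ (n := k + 1), List.map_append]
    simp only [List.foldl_cons, List.foldl_nil, List.map_cons, List.map_nil]
    congr 1
    have h1 : ((List.range (k + 1)).map (fun j => pvS image (row + 1) j)).getD k 0
        = pvS image (row + 1) k := PySem.List.getD_map_range _ _ _ _ (by omega)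
    have h2 : prev.getD (k + 1) 0 = pvS image row (k + 1) := by
      rw [hprev]; exact PySem.List.getD_map_range _ _ _ _ (by omega)
    have h3 : prev.getD k 0 = pvS image row k := by
      rw [hprev]; exact PySem.List.getD_map_range _ _ _ _ (by omega)
    rw [h1, h2, h3, pvS_rec]

-- A's pres table is the pvS value table
lemma pvPres_eq (image : List (List Int)) (n : Nat) (k : Nat) :
    (List.range k).foldl (fun pres row =>
      let prev := pres.getD row []
      let nr := (List.range n).foldl (fun nr col =>
          nr ++ [pvPx image row col + nr.getD col 0 + prev.getD (col + 1) 0 - prev.getD col 0])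
        [0]
      pres ++ [nr]) [List.replicate (n + 1) 0]
    = (List.range (k + 1)).map (fun i => (List.range (n + 1)).map (fun j => pvS image i j)) := by
  induction k with
  | zero => simp [pvS]
  | succ k ih =>
    rw [List.range_succ, List.foldl_append, ih]
    simp only [List.foldl_cons, List.foldl_nil]
    rw [List.range_succ (n := k + 1), List.map_append]
    congr 1
    simp only [PySem.List.getD_map_range _ _ _ _ (Nat.lt_succ_self k)]
    rw [pvRow_eq image n k _ rfl n (Nat.le_refl n)]
    simp

-- membership in a fold whose step adds a describable batch of elements
lemma pvMem_foldl {β : Type} (l : List β) (step : PySem.Set (Int × Int) → β → PySem.Set (Int × Int))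
    (Q : β → Prop) (x : Int × Int)
    (hstep : ∀ s y, x ∈ step s y ↔ x ∈ s ∨ Q y) :
    ∀ s0, x ∈ l.foldl step s0 ↔ x ∈ s0 ∨ ∃ y ∈ l, Q y := by
  induction l with
  | nil => simp
  | cons y t ih =>
    intro s0
    simp only [List.foldl_cons, ih, hstep, List.mem_cons]
    constructor
    · rintro ((h | h) | ⟨z, hz, hq⟩)
      · exact Or.inl h
      · exact Or.inr ⟨y, Or.inl rfl, h⟩
      · exact Or.inr ⟨z, Or.inr hz, hq⟩
    · rintro (h | ⟨z, (rfl | hz), hq⟩)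
      · exact Or.inl (Or.inl h)
      · exact Or.inl (Or.inr hq)
      · exact Or.inr ⟨z, hz, hq⟩

lemma pvAddOffs_mem (s : PySem.Set (Int × Int)) (row col : Nat) (offs : List (Int × Int))
    (x : Int × Int) :
    x ∈ pvAddOffs s row col offs
      ↔ x ∈ s ∨ ∃ p ∈ offs, x = ((row : Int) + p.1, (col : Int) + p.2) := by
  have h : pvAddOffs s row col offs
      = PySem.Set.update s (offs.map (fun p => ((row : Int) + p.1, (col : Int) + p.2))) := by
    simp [pvAddOffs, PySem.Set.update, List.foldl_map]
  rw [h, PySem.Set.mem_update]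
  simp [eq_comm]

-- a horizontal-sweep entry of the excludes set ↔ a violating horizontal pair inside the window
lemma pvH_side (image : List (List Int)) (threshold : Int) (m n r c : Nat)
    (hr : r < m - 2) (hc : c < n - 2) :
    (∃ row ∈ List.range m, ∃ col ∈ List.range' 1 (n - 1),
        threshold < |pvPx image row (col - 1) - pvPx image row col| ∧
        ∃ p ∈ pvOffsH, ((r : Int), (c : Int)) = ((row : Int) + p.1, (col : Int) + p.2))
    ↔ ∃ i < 3, ∃ j < 2, threshold < |pvPx image (r + i) (c + j) - pvPx image (r + i) (c + j + 1)| := by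
  constructor
  · rintro ⟨row, hrow, col, hcol, hcond, p, hp, hx⟩
    simp only [List.mem_range] at hrow
    simp only [List.mem_range'] at hcol
    simp only [pvOffsH, List.mem_cons, List.not_mem_nil, or_false] at hp
    have hb : r ≤ row ∧ row ≤ r + 2 ∧ c + 1 ≤ col ∧ col ≤ c + 2 := by
      rcases hp with rfl|rfl|rfl|rfl|rfl|rfl <;>
        (simp only [Prod.mk.injEq] at hx; omega)
    refine ⟨row - r, by omega, col - c - 1, by omega, ?_⟩
    have e1 : r + (row - r) = row := by omega
    have e2 : c + (col - c - 1) = col - 1 := by omega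
    have e4 : col - 1 + 1 = col := by omega
    rw [e1, e2, e4]; exact hcond
  · rintro ⟨i, hi, j, hj, hcond⟩
    refine ⟨r + i, by simp only [List.mem_range]; omega,
            c + j + 1, by simp only [List.mem_range']; exact ⟨c + j, by omega, by omega⟩, ?_, ?_⟩
    · have e2 : c + j + 1 - 1 = c + j := by omega
      rw [e2]; exact hcond
    · simp only [pvOffsH, List.mem_cons, List.not_mem_nil, or_false, exists_eq_or_imp,
        exists_eq_left, Prod.mk.injEq]
      push_cast
      omega

-- a vertical-sweep entry of the excludes set ↔ a violating vertical pair inside the window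
lemma pvV_side (image : List (List Int)) (threshold : Int) (m n r c : Nat)
    (hr : r < m - 2) (hc : c < n - 2) :
    (∃ col ∈ List.range n, ∃ row ∈ List.range' 1 (m - 1),
        threshold < |pvPx image (row - 1) col - pvPx image row col| ∧
        ∃ p ∈ pvOffsV, ((r : Int), (c : Int)) = ((row : Int) + p.1, (col : Int) + p.2))
    ↔ ∃ i < 2, ∃ j < 3, threshold < |pvPx image (r + i) (c + j) - pvPx image (r + i + 1) (c + j)| := by
  constructor
  · rintro ⟨col, hcol, row, hrow, hcond, p, hp, hx⟩
    simp only [List.mem_range] at hcol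
    simp only [List.mem_range'] at hrow
    simp only [pvOffsV, List.mem_cons, List.not_mem_nil, or_false] at hp
    have hb : r + 1 ≤ row ∧ row ≤ r + 2 ∧ c ≤ col ∧ col ≤ c + 2 := by
      rcases hp with rfl|rfl|rfl|rfl|rfl|rfl <;>
        (simp only [Prod.mk.injEq] at hx; omega)
    refine ⟨row - r - 1, by omega, col - c, by omega, ?_⟩
    have e1 : r + (row - r - 1) = row - 1 := by omega
    have e4 : row - 1 + 1 = row := by omega
    have e3 : c + (col - c) = col := by omega
    rw [e1, e4, e3]; exact hcond
  · rintro ⟨i, hi, j, hj, hcond⟩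
    refine ⟨c + j, by simp only [List.mem_range]; omega,
            r + i + 1, by simp only [List.mem_range']; exact ⟨r + i, by omega, by omega⟩, ?_, ?_⟩
    · have e1 : r + i + 1 - 1 = r + i := by omega
      rw [e1]; exact hcond
    · simp only [pvOffsV, List.mem_cons, List.not_mem_nil, or_false, exists_eq_or_imp,
        exists_eq_left, Prod.mk.injEq]
      push_cast
      omega

-- characterisation of A's excludes set on the region top-lefts
lemma pvExcl_char (image : List (List Int)) (threshold : Int) (m n r c : Nat)
    (hr : r < m - 2) (hc : c < n - 2) :
    (((r : Int), (c : Int)) ∈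
      (List.range n).foldl (fun s col =>
        (List.range' 1 (m - 1)).foldl (fun s row =>
          if threshold < |pvPx image (row - 1) col - pvPx image row col| then
            pvAddOffs s row col pvOffsV
          else s) s)
        ((List.range m).foldl (fun s row =>
          (List.range' 1 (n - 1)).foldl (fun s col =>
            if threshold < |pvPx image row (col - 1) - pvPx image row col| then
              pvAddOffs s row col pvOffsH
            else s) s) PySem.Set.empty))
    ↔ (∃ i < 3, ∃ j < 2, threshold < |pvPx image (r + i) (c + j) - pvPx image (r + i) (c + j + 1)|)
      ∨ (∃ i < 2, ∃ j < 3, threshold < |pvPx image (r + i) (c + j) - pvPx image (r + i + 1) (c + j)|) := by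
  have hinH : ∀ (row : Nat) (s0 : PySem.Set (Int × Int)),
      ((r : Int), (c : Int)) ∈ (List.range' 1 (n - 1)).foldl (fun s col =>
          if threshold < |pvPx image row (col - 1) - pvPx image row col| then
            pvAddOffs s row col pvOffsH
          else s) s0
      ↔ ((r : Int), (c : Int)) ∈ s0 ∨ ∃ col ∈ List.range' 1 (n - 1),
          threshold < |pvPx image row (col - 1) - pvPx image row col| ∧
          ∃ p ∈ pvOffsH, ((r : Int), (c : Int)) = ((row : Int) + p.1, (col : Int) + p.2) := by
    intro row s0
    refine pvMem_foldl _ _ _ _ (fun s col => ?_) s0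
    split_ifs with h
    · rw [pvAddOffs_mem]; tauto
    · tauto
  have hinV : ∀ (col : Nat) (s0 : PySem.Set (Int × Int)),
      ((r : Int), (c : Int)) ∈ (List.range' 1 (m - 1)).foldl (fun s row =>
          if threshold < |pvPx image (row - 1) col - pvPx image row col| then
            pvAddOffs s row col pvOffsV
          else s) s0
      ↔ ((r : Int), (c : Int)) ∈ s0 ∨ ∃ row ∈ List.range' 1 (m - 1),
          threshold < |pvPx image (row - 1) col - pvPx image row col| ∧
          ∃ p ∈ pvOffsV, ((r : Int), (c : Int)) = ((row : Int) + p.1, (col : Int) + p.2) := by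
    intro col s0
    refine pvMem_foldl _ _ _ _ (fun s row => ?_) s0
    split_ifs with h
    · rw [pvAddOffs_mem]; tauto
    · tauto
  rw [pvMem_foldl _ _ _ _ (fun s col => hinV col s) _,
    pvMem_foldl _ _ _ _ (fun s row => hinH row s) _]
  rw [pvH_side image threshold m n r c hr hc, pvV_side image threshold m n r c hr hc]
  simp only [PySem.Set.empty, List.not_mem_nil, false_or]

-- the 9-cell update loops of the two ports coincide
lemma pvNine (t : List (List (Int × Int))) (r c : Nat) (avg : Int) :
    pvCells9.foldl (fun t xy => pvUpd t (r + xy.1) (c + xy.2) avg) t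
      = (List.range 3).foldl (fun t i =>
          (List.range 3).foldl (fun t j => pvUpd t (r + i) (c + j) avg) t) t := rfl

theorem resultGrid_spec : Claim_equal_resultGrid := by
  intro image threshold _ _
  unfold Spec_resultGrid
  simp only [resultGrid, resultGrid_alt]
  have htab : (List.range (image.length - 2)).foldl (fun t (row : Nat) =>
      (List.range ((image.headD []).length - 2)).foldl (fun t (col : Nat) =>
        if ((row : Int), (col : Int)) ∈
            (List.range (image.headD []).length).foldl (fun s col =>
              (List.range' 1 (image.length - 1)).foldl (fun s row =>
                if threshold < |pvPx image (row - 1) col - pvPx image row col| then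
                  pvAddOffs s row col pvOffsV
                else s) s)
              ((List.range image.length).foldl (fun s row =>
                (List.range' 1 ((image.headD []).length - 1)).foldl (fun s col =>
                  if threshold < |pvPx image row (col - 1) - pvPx image row col| then
                    pvAddOffs s row col pvOffsH
                  else s) s) PySem.Set.empty) then t
        else
          pvCells9.foldl (fun t xy => pvUpd t (row + xy.1) (col + xy.2)
            (PySem.Int.floordiv
              ((((List.range image.length).foldl (fun pres row =>
                  let prev := pres.getD row []
                  let nr := (List.range (image.headD []).length).foldl (fun nr col =>
                      nr ++ [pvPx image row col + nr.getD col 0 + prev.getD (col + 1) 0 - prev.getD col 0])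
                    [0]
                  pres ++ [nr]) [List.replicate ((image.headD []).length + 1) 0]).getD (row + 3) []).getD (col + 3) 0
                - (((List.range image.length).foldl (fun pres row =>
                  let prev := pres.getD row []
                  let nr := (List.range (image.headD []).length).foldl (fun nr col =>
                      nr ++ [pvPx image row col + nr.getD col 0 + prev.getD (col + 1) 0 - prev.getD col 0])
                    [0]
                  pres ++ [nr]) [List.replicate ((image.headD []).length + 1) 0]).getD (row + 3) []).getD col 0
                - (((List.range image.length).foldl (fun pres row =>
                  let prev := pres.getD row []
                  let nr := (List.range (image.headD []).length).foldl (fun nr col =>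
                      nr ++ [pvPx image row col + nr.getD col 0 + prev.getD (col + 1) 0 - prev.getD col 0])
                    [0]
                  pres ++ [nr]) [List.replicate ((image.headD []).length + 1) 0]).getD row []).getD (col + 3) 0
                + (((List.range image.length).foldl (fun pres row =>
                  let prev := pres.getD row []
                  let nr := (List.range (image.headD []).length).foldl (fun nr col =>
                      nr ++ [pvPx image row col + nr.getD col 0 + prev.getD (col + 1) 0 - prev.getD col 0])
                    [0]
                  pres ++ [nr]) [List.replicate ((image.headD []).length + 1) 0]).getD row []).getD col 0) 9)) t) t)
      (List.replicate image.length (List.replicate (image.headD []).length ((0 : Int), (0 : Int))))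
    = (List.range (image.length - 2)).foldl (fun t r =>
      (List.range ((image.headD []).length - 2)).foldl (fun t c =>
        if (((List.range 3).all fun i => (List.range 2).all fun j =>
              decide (|pvPx image (r + i) (c + j) - pvPx image (r + i) (c + j + 1)| ≤ threshold)) &&
            ((List.range 2).all fun i => (List.range 3).all fun j =>
              decide (|pvPx image (r + i) (c + j) - pvPx image (r + i + 1) (c + j)| ≤ threshold))) then
          (List.range 3).foldl (fun t i =>
            (List.range 3).foldl (fun t j => pvUpd t (r + i) (c + j)
              (PySem.Int.floordiv
                ((List.range 3).foldl (fun s i =>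
                  (List.range 3).foldl (fun s j => s + pvPx image (r + i) (c + j)) s) 0) 9)) t) t
        else t) t)
      (List.replicate image.length (List.replicate (image.headD []).length ((0 : Int), (0 : Int)))) := by
    apply PySem.List.foldl_congr_mem
    intro t row hrow
    apply PySem.List.foldl_congr_mem
    intro t' col hcol
    simp only [List.mem_range] at hrow hcol
    have hiff := pvExcl_char image threshold image.length (image.headD []).length row col hrow hcol
    have hsm : (((List.range 3).all fun i => (List.range 2).all fun j =>
          decide (|pvPx image (row + i) (col + j) - pvPx image (row + i) (col + j + 1)| ≤ threshold)) &&
        ((List.range 2).all fun i => (List.range 3).all fun j =>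
          decide (|pvPx image (row + i) (col + j) - pvPx image (row + i + 1) (col + j)| ≤ threshold))) = true
        ↔ ¬((∃ i < 3, ∃ j < 2, threshold < |pvPx image (row + i) (col + j) - pvPx image (row + i) (col + j + 1)|)
          ∨ (∃ i < 2, ∃ j < 3, threshold < |pvPx image (row + i) (col + j) - pvPx image (row + i + 1) (col + j)|)) := by
      simp only [Bool.and_eq_true, List.all_eq_true, List.mem_range, decide_eq_true_eq]
      push Not
      tauto
    by_cases hbad :
        (∃ i < 3, ∃ j < 2, threshold < |pvPx image (row + i) (col + j) - pvPx image (row + i) (col + j + 1)|)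
        ∨ (∃ i < 2, ∃ j < 3, threshold < |pvPx image (row + i) (col + j) - pvPx image (row + i + 1) (col + j)|)
    · rw [if_pos (hiff.mpr hbad), if_neg (by rw [hsm]; exact not_not_intro hbad)]
    · rw [if_neg (fun h => hbad (hiff.mp h)), if_pos (hsm.mpr hbad)]
      rw [pvPres_eq image (image.headD []).length image.length]
      have g33 : (((List.range (image.length + 1)).map (fun i => (List.range ((image.headD []).length + 1)).map (fun j => pvS image i j))).getD (row + 3) []).getD (col + 3) 0 = pvS image (row + 3) (col + 3) := by
        rw [PySem.List.getD_map_range _ _ _ _ (by omega), PySem.List.getD_map_range _ _ _ _ (by omega)]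
      have g30 : (((List.range (image.length + 1)).map (fun i => (List.range ((image.headD []).length + 1)).map (fun j => pvS image i j))).getD (row + 3) []).getD col 0 = pvS image (row + 3) col := by
        rw [PySem.List.getD_map_range _ _ _ _ (by omega), PySem.List.getD_map_range _ _ _ _ (by omega)]
      have g03 : (((List.range (image.length + 1)).map (fun i => (List.range ((image.headD []).length + 1)).map (fun j => pvS image i j))).getD row []).getD (col + 3) 0 = pvS image row (col + 3) := by
        rw [PySem.List.getD_map_range _ _ _ _ (by omega), PySem.List.getD_map_range _ _ _ _ (by omega)]
      have g00 : (((List.range (image.length + 1)).map (fun i => (List.range ((image.headD []).length + 1)).map (fun j => pvS image i j))).getD row []).getD col 0 = pvS image row col := by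
        rw [PySem.List.getD_map_range _ _ _ _ (by omega), PySem.List.getD_map_range _ _ _ _ (by omega)]
      rw [g33, g30, g03, g00, pvS_window image row col]
      have hsum : (List.range 3).foldl (fun s i =>
            (List.range 3).foldl (fun s j => s + pvPx image (row + i) (col + j)) s) 0
          = pvPx image row col + pvPx image row (col + 1) + pvPx image row (col + 2)
            + pvPx image (row + 1) col + pvPx image (row + 1) (col + 1) + pvPx image (row + 1) (col + 2)
            + pvPx image (row + 2) col + pvPx image (row + 2) (col + 1) + pvPx image (row + 2) (col + 2) := by
        rw [show List.range 3 = [0, 1, 2] from rfl]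
        simp only [List.foldl_cons, List.foldl_nil, Nat.add_zero]
        ring
      rw [hsum, pvNine]
  rw [htab]
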